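-- pv_equiv track=rewrite | github.com/reidbraswell1/bookbot | main.py | count_non_alpha_letters
-- ===== SOURCE A (Python) =====
-- def count_non_alpha_letters(string):
--
--     dict = {}
--
--     for letter in string.lower():
--         if not letter.isalpha():
--             if letter in dict:
--                 dict[letter] = dict[letter] + 1
--             else:
--                 dict[letter] = 1
--     return dict
-- ===== SOURCE B (Python) =====
-- def count_non_alpha_letters(string):
--     low = string.lower()
--     return {ch: low.count(ch) for ch in dict.fromkeys(low) if not ch.isalpha()}
-- ===== Notes on version B (the rewrite author's own statement) =====
-- stated objective: idiomatic
-- what changed: Replaces the accumulating per-character dict-update loop with a build-distinct-keys-then-count shape: lowercase once, take the distinct characters in first-occurrence order via dict.fromkeys, and return a dict comprehension counting each non-alpha key with str.count.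
import Mathlib
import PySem

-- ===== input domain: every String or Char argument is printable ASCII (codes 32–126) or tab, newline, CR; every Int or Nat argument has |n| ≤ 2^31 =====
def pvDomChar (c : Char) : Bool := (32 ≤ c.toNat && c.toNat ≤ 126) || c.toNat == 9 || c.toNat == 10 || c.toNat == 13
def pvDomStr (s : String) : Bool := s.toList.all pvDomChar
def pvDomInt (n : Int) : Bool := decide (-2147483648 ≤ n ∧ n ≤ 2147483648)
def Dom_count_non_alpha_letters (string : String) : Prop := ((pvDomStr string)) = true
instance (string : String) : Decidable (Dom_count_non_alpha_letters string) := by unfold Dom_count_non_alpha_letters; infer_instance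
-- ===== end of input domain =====

-- B replaces A's single accumulating dict-update pass with a distinct-keys-then-count shape
-- (dedup the lowercased string, then count each non-alpha key by rescanning); idiomatic, not faster.


-- ===== PORT A =====
-- A iterates over string.lower(); each 1-char 'letter' is a dict key (a 1-char String here).
def count_non_alpha_letters (string : String) : List (String × Int) :=
  ((PySem.Str.lower string).toList.foldl
    (fun (d : PySem.Dict String Int) letter =>
      if !(PySem.Chars.isalpha letter) then
        let k := String.singleton letter
        if d.contains k then
          d.insert k (d.getD k 0 + 1)   -- dict[letter] = dict[letter] + 1 (key present: getD k 0 = dict[letter])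
        else
          d.insert k 1
      else d)
    PySem.Dict.empty).items

-- ===== PORT B =====
-- Source B: low = string.lower(); {ch: low.count(ch) for ch in dict.fromkeys(low) if not ch.isalpha()}
-- dict.fromkeys(low) = PySem.List.dedup; str.count of a 1-char needle = List.count of the char.
def count_non_alpha_letters_alt (string : String) : List (String × Int) :=
  let low := (PySem.Str.lower string).toList
  ((PySem.List.dedup low).foldl
    (fun (d : PySem.Dict String Int) ch =>
      if !(PySem.Chars.isalpha ch) then
        d.insert (String.singleton ch) ((low.count ch : Int))
      else d)
    PySem.Dict.empty).items

-- ===== PRECONDITION & SPEC =====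
def Spec_count_non_alpha_letters (string : String) (out : List (String × Int)) : Prop := out = count_non_alpha_letters_alt string
instance (string : String) (out : List (String × Int)) : Decidable (Spec_count_non_alpha_letters string out) := by unfold Spec_count_non_alpha_letters; infer_instance

-- ===== CLAIM (what is proved, stated in full; the proofs are below) =====
def Claim_equal_count_non_alpha_letters : Prop := ∀ (string : String), Dom_count_non_alpha_letters string → Spec_count_non_alpha_letters string (count_non_alpha_letters string)

-- ===== LEMMAS AND PROOFS =====

theorem singleton_injective : Function.Injective String.singleton := by
  intro a b h
  have : (String.singleton a).toList = (String.singleton b).toList := by rw [h]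
  simpa [String.singleton] using this

-- Set.ofList commutes with filter.
theorem foldl_setAdd_filter {α : Type} [DecidableEq α] (p : α → Bool) (xs : List α) :
    ∀ acc : List α, (xs.filter p).foldl PySem.Set.add (acc.filter p)
      = (xs.foldl PySem.Set.add acc).filter p := by
  induction xs with
  | nil => intro acc; rfl
  | cons x xs ih =>
    intro acc
    by_cases hx : p x = true
    · have hadd : PySem.Set.add (acc.filter p) x = (PySem.Set.add acc x).filter p := by
        by_cases hm : x ∈ acc
        · rw [PySem.Set.add_of_mem (by simpa [List.mem_filter, hx]), PySem.Set.add_of_mem hm]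
        · rw [PySem.Set.add_of_not_mem (by simp [List.mem_filter, hm]),
            PySem.Set.add_of_not_mem hm, List.filter_append]
          simp [hx]
      simp only [List.filter_cons, hx, if_pos, List.foldl_cons, hadd]
      exact ih (PySem.Set.add acc x)
    · have hx' : p x = false := by simpa using hx
      have hadd : (PySem.Set.add acc x).filter p = acc.filter p := by
        by_cases hm : x ∈ acc
        · rw [PySem.Set.add_of_mem hm]
        · rw [PySem.Set.add_of_not_mem hm, List.filter_append]; simp [hx']
      simp only [List.filter_cons, hx', List.foldl_cons, ← hadd]
      exact ih (PySem.Set.add acc x)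

-- Set.ofList commutes with an injective map.
theorem foldl_setAdd_map {α β : Type} [DecidableEq α] [DecidableEq β]
    (f : α → β) (hf : Function.Injective f) (xs : List α) :
    ∀ acc : List α, (xs.map f).foldl PySem.Set.add (acc.map f)
      = (xs.foldl PySem.Set.add acc).map f := by
  induction xs with
  | nil => intro acc; rfl
  | cons x xs ih =>
    intro acc
    have hadd : PySem.Set.add (acc.map f) (f x) = (PySem.Set.add acc x).map f := by
      by_cases hm : x ∈ acc
      · rw [PySem.Set.add_of_mem (List.mem_map_of_mem hm), PySem.Set.add_of_mem hm]
      · rw [PySem.Set.add_of_not_mem (by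
            intro h
            obtain ⟨y, hy, hxy⟩ := List.mem_map.mp h
            exact hm (hf hxy ▸ hy)),
          PySem.Set.add_of_not_mem hm, List.map_append]
        rfl
    simp only [List.map_cons, List.foldl_cons, hadd]
    exact ih (PySem.Set.add acc x)

theorem ofList_filter_char (p : Char → Bool) (xs : List Char) :
    PySem.Set.ofList (xs.filter p) = (PySem.Set.ofList xs).filter p := by
  simpa using foldl_setAdd_filter p xs []

theorem ofList_map_singleton (xs : List Char) :
    PySem.Set.ofList (xs.map String.singleton)
      = (PySem.Set.ofList xs).map String.singleton := by
  simpa using foldl_setAdd_map String.singleton singleton_injective xs []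

-- A's loop body collapses to the unconditional counting insert.
theorem stepA_eq (d : PySem.Dict String Int) (c : Char) :
    (if !(PySem.Chars.isalpha c) then
        let k := String.singleton c
        if d.contains k then d.insert k (d.getD k 0 + 1) else d.insert k 1
      else d)
    = (if !(PySem.Chars.isalpha c) then
        d.insert (String.singleton c) (d.getD (String.singleton c) 0 + 1) else d) := by
  by_cases h : PySem.Chars.isalpha c
  · simp [h]
  · simp only [h, Bool.not_false, if_true]
    by_cases hc : d.contains (String.singleton c) = true
    · simp [hc]
    · have hc' : d.contains (String.singleton c) = false := by simpa using hc
      rw [PySem.Dict.getD_of_not_contains d 0 hc']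
      simp [hc']

-- Port A, in closed form: distinct non-alpha chars of the lowered string, each with its count.
theorem portA_items (string : String) :
    count_non_alpha_letters string
      = (((PySem.Set.ofList (PySem.Str.lower string).toList).filter
            (fun c => !(PySem.Chars.isalpha c))).map
          (fun c => (String.singleton c, ((PySem.Str.lower string).toList.count c : Int)))) := by
  unfold count_non_alpha_letters
  set low := (PySem.Str.lower string).toList with hlow
  set p : Char → Bool := fun c => !(PySem.Chars.isalpha c) with hp
  have h1 : low.foldl
      (fun (d : PySem.Dict String Int) letter =>
        if !(PySem.Chars.isalpha letter) then
          let k := String.singleton letter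
          if d.contains k then d.insert k (d.getD k 0 + 1) else d.insert k 1
        else d) PySem.Dict.empty
      = low.foldl (fun (d : PySem.Dict String Int) c =>
          if p c then d.insert (String.singleton c) (d.getD (String.singleton c) 0 + 1) else d)
        PySem.Dict.empty :=
    PySem.List.foldl_congr_mem low _ _ _ (fun d c _ => stepA_eq d c)
  rw [h1, PySem.List.foldl_if_eq_foldl_filter]
  have h2 : (low.filter p).foldl
      (fun (d : PySem.Dict String Int) c =>
        d.insert (String.singleton c) (d.getD (String.singleton c) 0 + 1)) PySem.Dict.empty
      = ((low.filter p).map String.singleton).foldl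
        (fun (d : PySem.Dict String Int) k => d.insert k (d.getD k 0 + 1)) PySem.Dict.empty := by
    rw [List.foldl_map]
  rw [h2, PySem.Dict.foldl_insert_getD_add_one_eq_counter, PySem.Dict.items_counter,
    ofList_map_singleton, ofList_filter_char, List.map_map]
  refine List.map_congr_left ?_
  intro c hc
  have hcp : p c = true := (List.mem_filter.mp (by simpa using hc)).2
  simp only [Function.comp]
  congr 1
  rw [List.count_map_of_injective _ String.singleton singleton_injective,
    List.count_filter]
  simp [hcp]

-- Port B, in the same closed form.
theorem portB_items (string : String) :
    count_non_alpha_letters_alt string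
      = (((PySem.Set.ofList (PySem.Str.lower string).toList).filter
            (fun c => !(PySem.Chars.isalpha c))).map
          (fun c => (String.singleton c, ((PySem.Str.lower string).toList.count c : Int)))) := by
  show ((PySem.List.dedup (PySem.Str.lower string).toList).foldl
      (fun (d : PySem.Dict String Int) ch =>
        if !(PySem.Chars.isalpha ch) then
          d.insert (String.singleton ch) (((PySem.Str.lower string).toList.count ch : Int))
        else d)
      PySem.Dict.empty).items = _
  set low := (PySem.Str.lower string).toList with hlow
  set p : Char → Bool := fun c => !(PySem.Chars.isalpha c) with hp
  rw [PySem.List.foldl_if_eq_foldl_filter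
      (f := fun (d : PySem.Dict String Int) ch =>
        d.insert (String.singleton ch) ((low.count ch : Int)))]
  rw [PySem.List.dedup_eq_ofList]
  have hnodup : ((((PySem.Set.ofList low).filter p)).map String.singleton).Nodup :=
    ((PySem.Set.nodup_ofList low).filter p).map singleton_injective
  rw [PySem.Dict.items_foldl_insert_fresh ((PySem.Set.ofList low).filter p)
      String.singleton (fun c => (low.count c : Int)) PySem.Dict.empty
      (fun a _ => PySem.Dict.contains_empty _) hnodup]
  simp [PySem.Dict.empty]

-- ===== VERDICT (by name: the statement is the Claim_ definition above) =====
theorem count_non_alpha_letters_spec : Claim_equal_count_non_alpha_letters := by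
  intro string _
  unfold Spec_count_non_alpha_letters
  rw [portA_items, portB_items]
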